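-- pv_equiv track=rewrite | github.com/kyungminlee/fortran-migrator | recipes/blas/migrate_blas.py | build_rename_map
-- ===== SOURCE A (Python) =====
-- def classify_prefix(name: str) -> tuple[str, str]:
--     """Return (prefix_char, base_name) for a BLAS symbol.
--     prefix_char is one of S,D,C,Z or '' for non-precision symbols.
--     """
--     if len(name) < 2:
--         return ('', name)
--     first = name[0]
--     if first in ('S', 'D', 'C', 'Z'):
--         return (first, name[1:])
--     return ('', name)
--
-- def build_rename_map(symbols: set[str], target_kind: int) -> dict[str, str]:
--     """Build old_name → new_name mapping."""
--     prefix_map = {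
--         'S': 'E' if target_kind == 10 else 'Q',
--         'D': 'E' if target_kind == 10 else 'Q',
--         'C': 'Y' if target_kind == 10 else 'X',
--         'Z': 'Y' if target_kind == 10 else 'X',
--     }
--     rename = {}
--     # Collect base names that have at least one precision variant
--     bases_with_variants = set()
--     for sym in symbols:
--         pfx, base = classify_prefix(sym)
--         if pfx:
--             bases_with_variants.add(base)
--
--     for sym in symbols:
--         pfx, base = classify_prefix(sym)
--         if pfx and base in bases_with_variants:
--             new_pfx = prefix_map[pfx]
--             rename[sym] = new_pfx + base
--     return rename
-- ===== SOURCE B (Python) =====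
-- def build_rename_map(symbols: set[str], target_kind: int) -> dict[str, str]:
--     """Build old_name -> new_name mapping (single pass, no variant-collection set)."""
--     pmap = {'S': 'E', 'D': 'E', 'C': 'Y', 'Z': 'Y'} if target_kind == 10 \
--         else {'S': 'Q', 'D': 'Q', 'C': 'X', 'Z': 'X'}
--     return {s: pmap[s[0]] + s[1:] for s in symbols
--             if len(s) >= 2 and s[0] in pmap}
-- ===== Notes on version B (the rewrite author's own statement) =====
-- stated objective: simpler
-- what changed: B replaces A's two passes (first collecting a 'bases_with_variants' set, then filtering on it) with one dict comprehension keyed directly on the first character, since the collected-set test is provably always true for any symbol with a precision prefix; the classify_prefix helper and the set are dropped.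
import Mathlib
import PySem

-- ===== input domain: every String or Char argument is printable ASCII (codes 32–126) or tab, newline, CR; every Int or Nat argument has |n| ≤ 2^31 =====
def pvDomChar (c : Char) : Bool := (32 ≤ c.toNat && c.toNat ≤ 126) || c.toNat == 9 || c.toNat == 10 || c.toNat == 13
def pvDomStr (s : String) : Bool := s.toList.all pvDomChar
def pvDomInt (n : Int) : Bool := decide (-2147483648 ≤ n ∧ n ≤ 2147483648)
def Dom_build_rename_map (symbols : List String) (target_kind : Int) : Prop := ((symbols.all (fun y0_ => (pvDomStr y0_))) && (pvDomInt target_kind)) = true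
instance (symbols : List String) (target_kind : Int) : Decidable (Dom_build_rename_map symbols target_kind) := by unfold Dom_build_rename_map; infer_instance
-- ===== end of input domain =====

-- B replaces A's two passes (collect a bases set, then filter on it) by one direct pass; objective: simpler.

-- ===== PORT A =====
def classify_prefix (name : String) : String × String :=
  if PySem.Str.len name < 2 then ("", name)
  else
    match PySem.Str.pyGet? name 0 with
    | some first =>
        if first = 'S' ∨ first = 'D' ∨ first = 'C' ∨ first = 'Z' then
          (String.ofList [first], PySem.Str.slice name (some 1) none)
        else ("", name)
    | none => ("", name)   -- unreachable: len name ≥ 2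

def build_rename_map (symbols : List String) (target_kind : Int) : List (String × String) :=
  let prefix_map : PySem.Dict String String := PySem.Dict.ofList
    [("S", if target_kind = 10 then "E" else "Q"),
     ("D", if target_kind = 10 then "E" else "Q"),
     ("C", if target_kind = 10 then "Y" else "X"),
     ("Z", if target_kind = 10 then "Y" else "X")]
  -- first pass: collect base names with a precision variant
  let bases_with_variants : PySem.Set String := symbols.foldl (fun st sym =>
      let pb := classify_prefix sym
      if pb.1 ≠ "" then PySem.Set.add st pb.2 else st) PySem.Set.empty
  -- second pass: build the rename dict  (prefix_map[pfx] never misses when pfx ≠ "")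
  let rename : PySem.Dict String String := symbols.foldl (fun d sym =>
      let pb := classify_prefix sym
      if pb.1 ≠ "" ∧ PySem.Set.contains bases_with_variants pb.2 then
        d.insert sym (String.ofList ((prefix_map.getD pb.1 "").toList ++ pb.2.toList))
      else d) PySem.Dict.empty
  rename.items

-- ===== PORT B =====
def build_rename_map_alt (symbols : List String) (target_kind : Int) : List (String × String) :=
  let pmap : PySem.Dict Char String :=
    if target_kind = 10 then PySem.Dict.ofList [('S', "E"), ('D', "E"), ('C', "Y"), ('Z', "Y")]
    else PySem.Dict.ofList [('S', "Q"), ('D', "Q"), ('C', "X"), ('Z', "X")]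
  (symbols.foldl (fun d s =>
      match s.toList with
      | c :: rest =>
          if 2 ≤ (c :: rest).length ∧ pmap.contains c then
            d.insert s (String.ofList ((pmap.getD c "").toList ++ rest))
          else d
      | [] => d) PySem.Dict.empty).items

-- ===== PRECONDITION & SPEC =====
def Spec_build_rename_map (symbols : List String) (target_kind : Int) (out : List (String × String)) : Prop := out = build_rename_map_alt symbols target_kind
instance (symbols : List String) (target_kind : Int) (out : List (String × String)) : Decidable (Spec_build_rename_map symbols target_kind out) := by unfold Spec_build_rename_map; infer_instance

-- ===== CLAIM (what is proved, stated in full; the proofs are below) =====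
def Claim_equal_build_rename_map : Prop := ∀ (symbols : List String) (target_kind : Int), Dom_build_rename_map symbols target_kind → Spec_build_rename_map symbols target_kind (build_rename_map symbols target_kind)

-- ===== LEMMAS AND PROOFS =====

lemma classify_short (s : String) (h : s.toList.length < 2) : classify_prefix s = ("", s) := by
  unfold classify_prefix
  rw [if_pos]
  rw [PySem.Str.len_eq]
  exact_mod_cast h

lemma classify_cons (s : String) (c : Char) (r0 : Char) (rest : List Char)
    (hl : s.toList = c :: r0 :: rest) :
    classify_prefix s =
      if c = 'S' ∨ c = 'D' ∨ c = 'C' ∨ c = 'Z' then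
        (String.ofList [c], String.ofList (r0 :: rest))
      else ("", s) := by
  unfold classify_prefix
  rw [if_neg]
  · have h0 : PySem.Str.pyGet? s 0 = some c := by
      simp [pysem, hl]
    rw [h0]
    dsimp only
    split_ifs with hc
    · have h2 : PySem.Str.slice s (some 1) none = String.ofList (r0 :: rest) := by
        apply String.toList_injective
        have : (PySem.Str.slice s (some 1) none).toList = s.toList.drop 1 := by simp [pysem]
        simp [this, hl]
      rw [h2]
    · rfl
  · rw [PySem.Str.len_eq, hl]
    simp

-- the first-pass fold step of A
def pvAStep (st : PySem.Set String) (sym : String) : PySem.Set String :=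
  if (classify_prefix sym).1 ≠ "" then PySem.Set.add st (classify_prefix sym).2 else st

lemma bases_mono (l : List String) (st : PySem.Set String) (x : String)
    (h : PySem.Set.contains st x = true) :
    PySem.Set.contains (l.foldl pvAStep st) x = true := by
  induction l generalizing st with
  | nil => exact h
  | cons a t ih =>
    apply ih
    unfold pvAStep
    split_ifs with hc
    · simp [pysem] at h ⊢
      exact Or.inl h
    · exact h

lemma bases_mem (l : List String) (st : PySem.Set String) (s : String)
    (hs : s ∈ l) (hp : (classify_prefix s).1 ≠ "") :
    PySem.Set.contains (l.foldl pvAStep st) (classify_prefix s).2 = true := by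
  induction l generalizing st with
  | nil => cases hs
  | cons a t ih =>
    rcases List.mem_cons.mp hs with rfl | hs
    · rw [List.foldl_cons]
      apply bases_mono
      unfold pvAStep
      rw [if_pos hp]
      simp [pysem]
    · exact ih _ hs

lemma main_eq (symbols : List String) (target_kind : Int) :
    build_rename_map symbols target_kind = build_rename_map_alt symbols target_kind := by
  simp only [build_rename_map, build_rename_map_alt]
  congr 1
  rw [show (fun (st : PySem.Set String) (sym : String) =>
        if (classify_prefix sym).1 ≠ "" then PySem.Set.add st (classify_prefix sym).2 else st) = pvAStep from rfl]
  apply PySem.List.foldl_congr_mem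
  intro d s hs
  match hl : s.toList with
  | [] =>
    have hcl := classify_short s (by rw [hl]; simp)
    simp only [hl, hcl]
    simp
  | [c] =>
    have hcl := classify_short s (by rw [hl]; simp)
    simp only [hl, hcl]
    simp
  | c :: r0 :: rest =>
    have hcl := classify_cons s c r0 rest hl
    have hne : String.ofList [c] ≠ "" := by
      intro h
      have := congrArg String.toList h
      simp at this
    by_cases hc : c = 'S' ∨ c = 'D' ∨ c = 'C' ∨ c = 'Z'
    · rw [if_pos hc] at hcl
      have hb : (symbols.foldl pvAStep PySem.Set.empty).contains (String.ofList (r0 :: rest)) = true := by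
        have h2 := bases_mem symbols PySem.Set.empty s hs (by rw [hcl]; exact hne)
        rw [hcl] at h2
        exact h2
      simp only [hcl]
      rw [if_pos ⟨hne, hb⟩]
      rcases hc with rfl | rfl | rfl | rfl <;>
        by_cases htk : target_kind = 10 <;>
          simp only [htk, if_pos, if_neg, not_false_iff] <;>
          split_ifs with h2 <;>
          first
            | exact absurd ⟨by simp, by decide⟩ h2
            | (congr 1
               apply String.toList_injective
               simp
               try decide)
    · rw [if_neg hc] at hcl
      push Not at hc
      obtain ⟨e1, e2, e3, e4⟩ := hc
      have hcc : ((if target_kind = 10 then PySem.Dict.ofList [('S', "E"), ('D', "E"), ('C', "Y"), ('Z', "Y")]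
            else PySem.Dict.ofList [('S', "Q"), ('D', "Q"), ('C', "X"), ('Z', "X")]) : PySem.Dict Char String).contains c = false := by
        by_cases htk : target_kind = 10 <;>
          simp [htk, PySem.Dict.contains, PySem.Dict.ofList, PySem.Dict.update,
                PySem.Dict.insert, PySem.Dict.empty] <;>
          exact ⟨Ne.symm e1, Ne.symm e2, Ne.symm e3, Ne.symm e4⟩
      simp only [hl, hcl]
      rw [if_neg (by simp)]
      simp [hcc]

-- ===== VERDICT (by name: the statement is the Claim_ definition above) =====
theorem build_rename_map_spec : Claim_equal_build_rename_map := by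
  intro symbols target_kind _
  exact main_eq symbols target_kind
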